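-- pv_equiv track=rewrite | github.com/chrisc123/jebao_aqua-homeassistant | custom_components/jebao_aqua/api.py | _extract_bits_multi_byte
-- ===== SOURCE A (Python) =====
-- def _extract_bits_multi_byte(payload_bytes, byte_offset, bit_offset, length):
--     """Extract bits that may span multiple bytes.
--
--     Args:
--         payload_bytes: Complete payload as bytes
--         byte_offset: Starting byte position
--         bit_offset: Starting bit position within the first byte
--         length: Number of bits to extract
--
--     Returns:
--         int: Extracted value
--     """
--     result = 0
--     bits_remaining = length
--     current_byte = byte_offset
--     current_bit = bit_offset
--
--     while bits_remaining > 0: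
--         # How many bits we can get from current byte
--         bits_from_this_byte = min(8 - current_bit, bits_remaining)
--
--         # Extract value from current byte
--         mask = (1 << bits_from_this_byte) - 1
--         value = (payload_bytes[current_byte] >> current_bit) & mask
--
--         # Position these bits in result
--         shift = length - bits_remaining  # Shift based on remaining bits
--         result |= value << shift
--
--         # Move to next byte if needed
--         bits_remaining -= bits_from_this_byte
--         if bits_remaining > 0:
--             current_byte += 1
--             current_bit = 0
--
--     return result
-- ===== SOURCE B (Python) =====
-- def _extract_bits_multi_byte(payload_bytes, byte_offset, bit_offset, length):
--     """Extract bits that may span multiple bytes (single shift-and-mask rewrite)."""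
--     if length <= 0:
--         return 0
--     nbytes = (bit_offset + length + 7) // 8
--     val = 0
--     for i in range(nbytes):
--         val |= (payload_bytes[byte_offset + i] & 0xFF) << (8 * i)
--     return (val >> bit_offset) & ((1 << length) - 1)
-- ===== Notes on version B (the rewrite author's own statement) =====
-- stated objective: simpler
-- what changed: Instead of A's stateful per-byte loop that slices, masks and places each byte's bit-group into the result, B assembles the touched bytes into one integer and extracts the field with a single shift and a single mask.
import Mathlib
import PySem

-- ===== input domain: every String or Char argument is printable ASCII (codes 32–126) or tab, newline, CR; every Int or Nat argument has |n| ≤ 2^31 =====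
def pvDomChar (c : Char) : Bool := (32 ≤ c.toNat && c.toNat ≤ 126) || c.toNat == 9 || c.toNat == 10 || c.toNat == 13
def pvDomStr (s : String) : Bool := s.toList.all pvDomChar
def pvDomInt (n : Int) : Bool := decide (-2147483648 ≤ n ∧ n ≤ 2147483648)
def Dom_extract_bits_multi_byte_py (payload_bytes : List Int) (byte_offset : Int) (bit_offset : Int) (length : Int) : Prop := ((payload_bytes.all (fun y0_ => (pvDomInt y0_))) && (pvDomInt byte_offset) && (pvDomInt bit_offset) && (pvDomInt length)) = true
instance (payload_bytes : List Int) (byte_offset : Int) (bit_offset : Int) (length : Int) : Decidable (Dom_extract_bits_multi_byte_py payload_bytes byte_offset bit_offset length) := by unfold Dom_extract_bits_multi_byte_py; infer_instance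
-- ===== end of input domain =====

-- ===== PORT A =====
-- B rewrites A's per-byte extract/mask/place loop as one bytes-to-integer pass plus a single
-- shift-and-mask; equivalence is proved on Pre_ (exactly the inputs where A returns normally).

-- A's while-loop, one constructor of `fuel` per iteration (the Python loop can diverge, e.g.
-- bit_offset = 8; `none` = fuel exhausted or a Python exception: IndexError from the
-- subscript, ValueError from a negative shift count).
def pvALoop (payload : List Int) (length : Int) :
    Nat → Int → Int → Int → Int → Option Int
  | 0, _, _, _, _ => none
  | fuel+1, result, bits_remaining, current_byte, current_bit =>
    if bits_remaining ≤ 0 then some result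
    else
      -- bits_from_this_byte = min(8 - current_bit, bits_remaining)
      let bftb := min (8 - current_bit) bits_remaining
      -- Python raises ValueError on a negative shift count (1 << bftb, b >> current_bit)
      if bftb < 0 ∨ current_bit < 0 then none
      else
        match PySem.List.pyGet? payload current_byte with
        | none => none   -- IndexError
        | some b =>
          let mask : Int := (1 <<< bftb.toNat) - 1
          let value := PySem.Int.band (b >>> current_bit.toNat) mask
          let shift := length - bits_remaining
          if shift < 0 then none   -- ValueError (unreachable from the entry call)
          else
            let result' := PySem.Int.bor result (value <<< shift.toNat)
            let br' := bits_remaining - bftb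
            if br' > 0 then pvALoop payload length fuel result' br' (current_byte + 1) 0
            else pvALoop payload length fuel result' br' current_byte current_bit

def extract_bits_multi_byte_py (payload_bytes : List Int) (byte_offset : Int) (bit_offset : Int) (length : Int) : Int :=
  -- length + 1 units of fuel suffice: each iteration consumes ≥ 1 bit on every input in Pre_
  (pvALoop payload_bytes length (length.toNat + 1) 0 length byte_offset bit_offset).getD 0

-- ===== PORT B =====
-- for i in range(nbytes): val |= (payload_bytes[byte_offset + i] & 0xFF) << (8 * i)
def pvBLoop (payload : List Int) (byte_offset : Int) :
    List Nat → Int → Option Int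
  | [], val => some val
  | i :: rest, val =>
    match PySem.List.pyGet? payload (byte_offset + (i : Int)) with
    | none => none   -- IndexError
    | some b =>
      pvBLoop payload byte_offset rest (PySem.Int.bor val ((PySem.Int.band b 255) <<< (8 * i)))

def extract_bits_multi_byte_py_alt (payload_bytes : List Int) (byte_offset : Int) (bit_offset : Int) (length : Int) : Int :=
  if length ≤ 0 then 0
  else
    let nbytes := PySem.Int.floordiv (bit_offset + length + 7) 8
    match pvBLoop payload_bytes byte_offset (List.range nbytes.toNat) 0 with
    | none => 0   -- IndexError (outside Pre_)
    | some val =>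
      if bit_offset < 0 then 0   -- ValueError on val >> bit_offset (outside Pre_)
      else PySem.Int.band (val >>> bit_offset.toNat) ((1 <<< length.toNat) - 1)

-- ===== PRECONDITION & SPEC =====
-- Pre_ is exactly the set of inputs on which the Python A returns normally: either length ≤ 0
-- (the loop body never runs), or 0 ≤ bit_offset < 8 (otherwise A raises ValueError on a
-- negative shift count, or loops forever at bit_offset = 8) and every byte the loop subscripts
-- is a valid Python index (otherwise IndexError).
def Pre_extract_bits_multi_byte_py (payload_bytes : List Int) (byte_offset : Int) (bit_offset : Int) (length : Int) : Prop :=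
  length ≤ 0 ∨
    (0 ≤ bit_offset ∧ bit_offset < 8 ∧
      ∀ i ∈ List.range ((bit_offset + length + 7).toNat / 8),
        -(payload_bytes.length : Int) ≤ byte_offset + (i : Int) ∧
          byte_offset + (i : Int) < (payload_bytes.length : Int))
instance (payload_bytes : List Int) (byte_offset : Int) (bit_offset : Int) (length : Int) : Decidable (Pre_extract_bits_multi_byte_py payload_bytes byte_offset bit_offset length) := by unfold Pre_extract_bits_multi_byte_py; infer_instance

def pvWitness_extract_bits_multi_byte_py : List Int × Int × Int × Int := ([5, 255], 0, 4, 8)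

def Spec_extract_bits_multi_byte_py (payload_bytes : List Int) (byte_offset : Int) (bit_offset : Int) (length : Int) (out : Int) : Prop := out = extract_bits_multi_byte_py_alt payload_bytes byte_offset bit_offset length
instance (payload_bytes : List Int) (byte_offset : Int) (bit_offset : Int) (length : Int) (out : Int) : Decidable (Spec_extract_bits_multi_byte_py payload_bytes byte_offset bit_offset length out) := by unfold Spec_extract_bits_multi_byte_py; infer_instance

-- ===== CLAIM (what is proved, stated in full; the proofs are below) =====
def Claim_equal_extract_bits_multi_byte_py : Prop := ∀ (payload_bytes : List Int) (byte_offset : Int) (bit_offset : Int) (length : Int), Dom_extract_bits_multi_byte_py payload_bytes byte_offset bit_offset length → Pre_extract_bits_multi_byte_py payload_bytes byte_offset bit_offset length → Spec_extract_bits_multi_byte_py payload_bytes byte_offset bit_offset length (extract_bits_multi_byte_py payload_bytes byte_offset bit_offset length)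

-- ===== LEMMAS AND PROOFS =====

-- Python's  x & (2^k - 1)  is  x mod 2^k, for every integer x (two's complement).
theorem pvBandPow (b : Int) (k : Nat) : PySem.Int.band b ((2 : Int) ^ k - 1) = b % ((2 : Int) ^ k) := by
  have hN : (0:Nat) < 2 ^ k := Nat.two_pow_pos k
  have hcast : ((2:Int) ^ k) = ((2 ^ k : Nat) : Int) := by push_cast; ring
  have htop : ((2 : Int) ^ k - 1).toNat = 2 ^ k - 1 := by rw [hcast]; omega
  by_cases hb : 0 ≤ b
  · rw [PySem.Int.band_of_nonneg hb (by rw [hcast]; omega)]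
    rw [htop, Nat.and_two_pow_sub_one_eq_mod, hcast]
    push_cast
    rw [Int.toNat_of_nonneg hb]
  · obtain ⟨m, hbm⟩ : ∃ m : Nat, b = -((m : Nat) : Int) - 1 := ⟨(-b - 1).toNat, by omega⟩
    subst hbm
    have hmod : m % 2 ^ k < 2 ^ k := Nat.mod_lt _ hN
    have hdm : (2 ^ k : Nat) * (m / 2 ^ k) + m % 2 ^ k = m := Nat.div_add_mod m (2 ^ k)
    have hdmI : ((2 ^ k : Nat) : Int) * ((m / 2 ^ k : Nat) : Int) + ((m % 2 ^ k : Nat) : Int) = (m : Int) := by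
      exact_mod_cast congrArg (fun x : Nat => (x : Int)) hdm
    simp only [PySem.Int.band]
    rw [if_neg (by omega), if_pos (by rw [hcast]; omega)]
    rw [show (-(-((m : Nat) : Int) - 1) - 1) = ((m : Nat) : Int) from by ring]
    rw [Int.toNat_natCast, htop, Nat.and_comm, Nat.and_two_pow_sub_one_eq_mod]
    have e1 : (-((m : Nat) : Int) - 1) =
        (((2 ^ k : Nat) : Int) - 1 - ((m % 2 ^ k : Nat) : Int)) + ((2 ^ k : Nat) : Int) * (-((m / 2 ^ k : Nat) : Int) - 1) := by
      linarith
    rw [hcast, e1, Int.add_mul_emod_self_left, Int.emod_eq_of_lt (by omega) (by omega)]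
    omega

-- A shifted-then-masked slice of an integer only depends on its low 8 bits (cb + c ≤ 8).
theorem pvSliceLow (b : Int) (cb c : Nat) (h : cb + c ≤ 8) :
    (b / (2 : Int) ^ cb) % (2 : Int) ^ c = ((b % 256) / (2 : Int) ^ cb) % (2 : Int) ^ c := by
  have h256 : (256 : Int) = 2 ^ cb * 2 ^ (8 - cb) := by
    rw [← pow_add, show cb + (8 - cb) = 8 from by omega]; norm_num
  have hsplit : (2:Int) ^ (8 - cb) = 2 ^ c * 2 ^ (8 - cb - c) := by
    rw [← pow_add]; congr 1; omega
  have hd : b = b % 256 + 2 ^ cb * (2 ^ (8 - cb) * (b / 256)) := by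
    have h1 : (256:Int) * (b / 256) + b % 256 = b := Int.ediv_add_emod b 256
    have h2 : (2:Int) ^ cb * (2 ^ (8 - cb) * (b / 256)) = 256 * (b / 256) := by
      rw [← mul_assoc, ← h256]
    linarith
  conv_lhs => rw [hd]
  rw [Int.add_mul_ediv_left _ _ (show (2:Int) ^ cb ≠ 0 from by positivity)]
  rw [hsplit, show (2:Int) ^ c * 2 ^ (8 - cb - c) * (b / 256) =
      2 ^ c * (2 ^ (8 - cb - c) * (b / 256)) from by ring]
  rw [Int.add_mul_emod_self_left]

-- Nat: (x + d*s) % (d*m) = x + d*(s % m) for x < d, 0 < m.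
theorem pvModMulSplit (x d s m : Nat) (hx : x < d) (hm : 0 < m) :
    (x + d * s) % (d * m) = x + d * (s % m) := by
  have hs : s % m < m := Nat.mod_lt _ hm
  have h1 : x + d * s = (x + d * (s % m)) + (d * m) * (s / m) := by
    conv_lhs => rw [← Nat.div_add_mod s m]
    ring
  rw [h1, Nat.add_mul_mod_self_left]
  exact Nat.mod_eq_of_lt (by nlinarith)

-- Nat: disjoint or is addition.
theorem pvOrDisjoint (r v s : Nat) (hr : r < 2 ^ s) :
    r ||| v * 2 ^ s = r + v * 2 ^ s := by
  have h := Nat.shiftLeft_add_eq_or_of_lt (b := r) (i := s) hr v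
  rw [Nat.shiftLeft_eq] at h
  rw [Nat.lor_comm, ← h, Nat.add_comm]

-- The value contributed by the rest of A's loop from byte j, bit cb, br bits still wanted,
-- relative to the current shift position.
def pvTail (f : Nat → Nat) (j br cb : Nat) : Nat :=
  if _hbr : br = 0 then 0
  else if _hc : min (8 - cb) br = 0 then 0
  else
    (f j / 2 ^ cb) % 2 ^ (min (8 - cb) br) +
      pvTail f (j + 1) (br - min (8 - cb) br) 0 * 2 ^ (min (8 - cb) br)
  termination_by br
  decreasing_by omega

def pvVSum (f : Nat → Nat) (n : Nat) : Nat := ∑ i ∈ Finset.range n, f i * 2 ^ (8 * i)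

theorem pvVSum_lt (f : Nat → Nat) (hf : ∀ i, f i < 256) (n : Nat) : pvVSum f n < 2 ^ (8 * n) := by
  induction n with
  | zero => simp [pvVSum]
  | succ n ih =>
    have h1 : pvVSum f (n + 1) = pvVSum f n + f n * 2 ^ (8 * n) := by
      simp [pvVSum, Finset.sum_range_succ]
    have h2 : (2:Nat) ^ (8 * (n + 1)) = 2 ^ (8 * n) * 256 := by
      rw [Nat.mul_succ, pow_add]; norm_num
    have := hf n
    nlinarith

-- Characterisation of pvTail as shift-and-mask of the assembled bytes.
theorem pvTail_eq (f : Nat → Nat) (hf : ∀ i, f i < 256) :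
    ∀ br j cb, 0 < br → cb < 8 →
      pvTail f j br cb =
        ((∑ i ∈ Finset.range ((cb + br + 7) / 8), f (j + i) * 2 ^ (8 * i)) / 2 ^ cb) % 2 ^ br := by
  intro br
  induction br using Nat.strong_induction_on with
  | _ br IH =>
    intro j cb hbr hcb
    rw [pvTail, dif_neg (by omega), dif_neg (by omega)]
    by_cases hcase : br ≤ 8 - cb
    · have hc : min (8 - cb) br = br := by omega
      rw [hc]
      rw [show br - br = 0 from by omega, pvTail, dif_pos rfl]
      have hone : (cb + br + 7) / 8 = 1 := by omega
      rw [hone]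
      simp
    · have hc : min (8 - cb) br = 8 - cb := by omega
      set c : Nat := 8 - cb with hcdef
      rw [hc]
      have hc1 : 0 < c := by omega
      have hcb8 : cb + c = 8 := by omega
      set br' : Nat := br - c with hbr'def
      have hbr'pos : 0 < br' := by omega
      have hih := IH br' (by omega) (j + 1) 0 hbr'pos (by omega)
      simp only [pow_zero, Nat.div_one] at hih
      rw [hih]
      set S' : Nat := ∑ i ∈ Finset.range ((0 + br' + 7) / 8), f (j + 1 + i) * 2 ^ (8 * i) with hS'
      have hm : (cb + br + 7) / 8 = (0 + br' + 7) / 8 + 1 := by omega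
      have hterm : ∀ k, f (j + (k + 1)) * 2 ^ (8 * (k + 1)) = 256 * (f (j + 1 + k) * 2 ^ (8 * k)) := by
        intro k
        rw [show j + (k + 1) = j + 1 + k from by ring,
           show 8 * (k + 1) = 8 * k + 8 from by ring, pow_add]
        norm_num
        ring
      have hsum : ∑ i ∈ Finset.range ((cb + br + 7) / 8), f (j + i) * 2 ^ (8 * i)
          = f j + 256 * S' := by
        rw [hm, Finset.sum_range_succ']
        simp only [hterm, Nat.add_zero, Nat.mul_zero, pow_zero, Nat.mul_one]
        rw [← Finset.mul_sum, ← hS']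
        ring
      rw [hsum]
      have h256 : (256:Nat) = 2 ^ cb * 2 ^ c := by
        rw [← pow_add, hcb8]; norm_num
      have hdiv : (f j + 256 * S') / 2 ^ cb = f j / 2 ^ cb + 2 ^ c * S' := by
        rw [show (256:Nat) * S' = (2 ^ c * S') * 2 ^ cb from by rw [h256]; ring]
        rw [Nat.add_mul_div_right _ _ (Nat.two_pow_pos cb)]
      rw [hdiv]
      have hx : f j / 2 ^ cb < 2 ^ c := by
        apply Nat.div_lt_of_lt_mul
        calc f j < 256 := hf j
        _ = 2 ^ cb * 2 ^ c := h256
      have hbrsplit : (2:Nat) ^ br = 2 ^ c * 2 ^ br' := by rw [← pow_add]; congr 1; omega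
      rw [hbrsplit, pvModMulSplit _ _ _ _ hx (Nat.two_pow_pos br')]
      rw [Nat.mod_eq_of_lt hx]
      ring

-- A-side loop invariant.
theorem pvALoop_inv (payload : List Int) (bo : Int) (Ln : Nat) (f : Nat → Nat)
    (hfv : ∀ (i : Nat) (b : Int), PySem.List.pyGet? payload (bo + (i : Int)) = some b → ((f i : Nat) : Int) = b % 256) :
    ∀ (brn fuel j cb r : Nat),
      0 < brn → brn ≤ Ln → cb < 8 → r < 2 ^ (Ln - brn) → brn + 1 ≤ fuel →
      (∀ i : Nat, j ≤ i → i < j + (cb + brn + 7) / 8 → (PySem.List.pyGet? payload (bo + (i : Int))).isSome) →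
      pvALoop payload (Ln : Int) fuel ((r : Nat) : Int) ((brn : Nat) : Int) (bo + (j : Int)) ((cb : Nat) : Int) =
        some (((r + pvTail f j brn cb * 2 ^ (Ln - brn) : Nat) : Int)) := by
  intro brn
  induction brn using Nat.strong_induction_on with
  | _ brn IH =>
    intro fuel j cb r hbr hle hcb hr hfuel hget
    obtain ⟨fuel', rfl⟩ : ∃ fuel', fuel = fuel' + 1 := ⟨fuel - 1, by omega⟩
    set c : Nat := min (8 - cb) brn with hcdef
    have hc1 : 0 < c := by omega
    have hccb : cb + c ≤ 8 := by omega
    have hcbr : c ≤ brn := by omega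
    have hgj : (PySem.List.pyGet? payload (bo + (j : Int))).isSome := by
      apply hget j le_rfl; omega
    obtain ⟨b, hb⟩ : ∃ b, PySem.List.pyGet? payload (bo + (j : Int)) = some b :=
      Option.isSome_iff_exists.mp hgj
    have hmin : min (8 - ((cb : Nat) : Int)) ((brn : Nat) : Int) = ((c : Nat) : Int) := by
      push_cast [hcdef]; omega
    set x : Nat := f j / 2 ^ cb % 2 ^ c with hxdef
    have hx : x < 2 ^ c := Nat.mod_lt _ (Nat.two_pow_pos c)
    have hvalue : PySem.Int.band (b >>> cb) (((1 <<< c : Nat) : Int) - 1) = ((x : Nat) : Int) := by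
      rw [show ((1 <<< c : Nat) : Int) = (2:Int) ^ c from by rw [Nat.shiftLeft_eq, one_mul]; push_cast; ring]
      rw [pvBandPow, Int.shiftRight_eq_div_pow]
      rw [show (((2:Nat) ^ cb : Nat) : Int) = (2:Int) ^ cb from by push_cast; ring]
      rw [pvSliceLow b cb c hccb, ← hfv j b hb]
      rw [hxdef]
      push_cast
      ring
    simp only [pvALoop]
    rw [if_neg (show ¬ (((brn : Nat) : Int) ≤ 0) from by omega)]
    simp only [hmin, Int.toNat_natCast, hb]
    rw [if_neg (show ¬ (((c : Nat) : Int) < 0 ∨ ((cb : Nat) : Int) < 0) from by omega)]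
    rw [hvalue]
    have hsh : ((Ln : Nat) : Int) - ((brn : Nat) : Int) = (((Ln - brn : Nat)) : Int) := by omega
    rw [hsh, if_neg (show ¬ ((((Ln - brn : Nat)) : Int) < 0) from by omega), Int.toNat_natCast]
    have hshl : ((x : Nat) : Int) <<< (Ln - brn) = (((x * 2 ^ (Ln - brn) : Nat)) : Int) := by
      rw [Int.shiftLeft_eq]; push_cast; ring
    rw [hshl]
    have hbor : PySem.Int.bor ((r : Nat) : Int) (((x * 2 ^ (Ln - brn) : Nat)) : Int)
        = (((r + x * 2 ^ (Ln - brn) : Nat)) : Int) := by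
      rw [PySem.Int.bor_of_nonneg (by positivity) (by positivity)]
      simp only [Int.toNat_natCast]
      rw [pvOrDisjoint _ _ _ hr]
    rw [hbor]
    by_cases hrest : 0 < brn - c
    · have hcc : c = 8 - cb := by omega
      rw [if_pos (show (0:Int) < ((brn : Nat) : Int) - ((c : Nat) : Int) from by omega)]
      have hstep : ((brn : Nat) : Int) - ((c : Nat) : Int) = (((brn - c : Nat)) : Int) := by omega
      have hbyte : bo + ((j : Nat) : Int) + 1 = bo + (((j + 1 : Nat)) : Int) := by push_cast; ring
      rw [hstep, hbyte, show (0:Int) = (((0 : Nat)) : Int) from rfl]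
      rw [IH (brn - c) (by omega) fuel' (j + 1) 0 (r + x * 2 ^ (Ln - brn)) hrest (by omega) (by omega)
        (by
          have h1 : Ln - (brn - c) = (Ln - brn) + c := by omega
          rw [h1, pow_add]
          have h3 : (0:Nat) < 2 ^ (Ln - brn) := Nat.two_pow_pos _
          calc r + x * 2 ^ (Ln - brn) < 2 ^ (Ln - brn) + x * 2 ^ (Ln - brn) := by omega
          _ = (1 + x) * 2 ^ (Ln - brn) := by ring
          _ ≤ 2 ^ c * 2 ^ (Ln - brn) := Nat.mul_le_mul_right _ (by omega)
          _ = 2 ^ (Ln - brn) * 2 ^ c := by ring)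
        (by omega)
        (by
          intro i hi1 hi2
          apply hget i (by omega)
          omega)]
      congr 1
      have hTail : pvTail f j brn cb = x + pvTail f (j + 1) (brn - c) 0 * 2 ^ c := by
        conv_lhs => rw [pvTail]
        rw [dif_neg (show ¬ (brn = 0) from by omega), ← hcdef,
           dif_neg (show ¬ (c = 0) from by omega), ← hxdef]
      rw [hTail]
      have hpow : (2:Nat) ^ (Ln - (brn - c)) = 2 ^ (Ln - brn) * 2 ^ c := by
        rw [← pow_add]; congr 1; omega
      push_cast [hpow]
      ring
    · have hc0 : brn - c = 0 := by omega
      rw [if_neg (show ¬ ((0:Int) < ((brn : Nat) : Int) - ((c : Nat) : Int)) from by omega)]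
      obtain ⟨fuel'', rfl⟩ : ∃ fuel'', fuel' = fuel'' + 1 := ⟨fuel' - 1, by omega⟩
      simp only [pvALoop]
      rw [if_pos (show ((brn : Nat) : Int) - ((c : Nat) : Int) ≤ 0 from by omega)]
      congr 1
      have hTail : pvTail f j brn cb = x + pvTail f (j + 1) (brn - c) 0 * 2 ^ c := by
        conv_lhs => rw [pvTail]
        rw [dif_neg (show ¬ (brn = 0) from by omega), ← hcdef,
           dif_neg (show ¬ (c = 0) from by omega), ← hxdef]
      rw [hTail, hc0, pvTail, dif_pos rfl]
      push_cast
      ring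

-- B-side: pvBLoop over an appended list.
theorem pvBLoop_append (payload : List Int) (bo : Int) (l₁ l₂ : List Nat) (v : Int) :
    pvBLoop payload bo (l₁ ++ l₂) v =
      match pvBLoop payload bo l₁ v with
      | none => none
      | some v' => pvBLoop payload bo l₂ v' := by
  induction l₁ generalizing v with
  | nil => simp [pvBLoop]
  | cons i rest ih =>
    simp only [List.cons_append, pvBLoop]
    cases PySem.List.pyGet? payload (bo + (i : Int)) with
    | none => rfl
    | some b => exact ih _

-- B-side loop invariant.
theorem pvBLoop_inv (payload : List Int) (bo : Int) (f : Nat → Nat)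
    (hfv : ∀ (i : Nat) (b : Int), PySem.List.pyGet? payload (bo + (i : Int)) = some b → ((f i : Nat) : Int) = b % 256)
    (hf : ∀ i, f i < 256) :
    ∀ n, (∀ i : Nat, i < n → (PySem.List.pyGet? payload (bo + (i : Int))).isSome) →
      pvBLoop payload bo (List.range n) 0 = some (((pvVSum f n : Nat)) : Int) := by
  intro n
  induction n with
  | zero => simp [pvBLoop, pvVSum]
  | succ n ih =>
    intro hget
    rw [List.range_succ, pvBLoop_append, ih (fun i hi => hget i (by omega))]
    obtain ⟨b, hb⟩ : ∃ b, PySem.List.pyGet? payload (bo + (n : Int)) = some b :=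
      Option.isSome_iff_exists.mp (hget n (by omega))
    simp only [pvBLoop, hb]
    congr 1
    have hband : PySem.Int.band b 255 = ((f n : Nat) : Int) := by
      rw [show (255:Int) = 2 ^ 8 - 1 from by norm_num, pvBandPow, hfv n b hb]
      norm_num
    rw [hband, Int.shiftLeft_eq]
    have h1 : ((f n : Nat) : Int) * 2 ^ (8 * n) = (((f n * 2 ^ (8 * n) : Nat)) : Int) := by
      push_cast; ring
    rw [h1, PySem.Int.bor_of_nonneg (by positivity) (by positivity)]
    simp only [Int.toNat_natCast]
    rw [pvOrDisjoint _ _ _ (pvVSum_lt f hf n)]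
    have h2 : pvVSum f (n + 1) = pvVSum f n + f n * 2 ^ (8 * n) := by
      simp [pvVSum, Finset.sum_range_succ]
    rw [h2]

-- pyGet? succeeds exactly on valid Python indices.
theorem pvGetSome (xs : List Int) (i : Int)
    (h : -(xs.length : Int) ≤ i ∧ i < (xs.length : Int)) :
    (PySem.List.pyGet? xs i).isSome := by
  simp only [PySem.List.pyGet?, PySem.List.pyIdx?]
  split_ifs with h1 h2 h3 <;>
    simp [Option.bind] <;>
    omega

-- ===== VERDICT (by name: the statement is the Claim_ definition above) =====
theorem extract_bits_multi_byte_py_spec : Claim_equal_extract_bits_multi_byte_py := by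
  intro payload bo p L _hdom hpre
  unfold Spec_extract_bits_multi_byte_py
  by_cases hL : L ≤ 0
  · simp [extract_bits_multi_byte_py, extract_bits_multi_byte_py_alt, pvALoop, hL]
  · have hL' : 0 < L := by omega
    obtain ⟨hp0, hp8, hidx⟩ : 0 ≤ p ∧ p < 8 ∧ ∀ i ∈ List.range ((p + L + 7).toNat / 8),
        -(payload.length : Int) ≤ bo + (i : Int) ∧ bo + (i : Int) < (payload.length : Int) := by
      rcases hpre with h | h
      · omega
      · exact h
    set f : Nat → Nat := fun i => (((PySem.List.pyGet? payload (bo + (i : Int))).getD 0) % 256).toNat with hfdef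
    have hfv : ∀ (i : Nat) (b : Int), PySem.List.pyGet? payload (bo + (i : Int)) = some b → ((f i : Nat) : Int) = b % 256 := by
      intro i b hb
      simp only [hfdef, hb, Option.getD_some]
      exact Int.toNat_of_nonneg (Int.emod_nonneg b (by norm_num))
    have hf : ∀ i, f i < 256 := by
      intro i
      simp only [hfdef]
      have h1 := Int.emod_nonneg ((PySem.List.pyGet? payload (bo + (i : Int))).getD 0) (show (256:Int) ≠ 0 from by norm_num)
      have h2 := Int.emod_lt_of_pos ((PySem.List.pyGet? payload (bo + (i : Int))).getD 0) (show (0:Int) < 256 from by norm_num)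
      omega
    set Ln : Nat := L.toNat with hLn
    set pn : Nat := p.toNat with hpn
    set nb : Nat := (pn + Ln + 7) / 8 with hnb
    have hLc : ((Ln : Nat) : Int) = L := Int.toNat_of_nonneg (by omega)
    have hpc : ((pn : Nat) : Int) = p := Int.toNat_of_nonneg hp0
    have hnbc : (p + L + 7).toNat / 8 = nb := by omega
    have hget : ∀ i : Nat, i < nb → (PySem.List.pyGet? payload (bo + (i : Int))).isSome := by
      intro i hi
      apply pvGetSome
      apply hidx
      rw [List.mem_range, hnbc]
      exact hi
    have hA : extract_bits_multi_byte_py payload bo p L = ((pvTail f 0 Ln pn : Nat) : Int) := by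
      unfold extract_bits_multi_byte_py
      rw [← hLc, ← hpc, show bo = bo + (((0 : Nat)) : Int) from by simp,
         show (((Ln : Nat) : Int)).toNat = Ln from Int.toNat_natCast Ln,
         show ((0:Int)) = (((0:Nat)) : Int) from rfl]
      rw [pvALoop_inv payload bo Ln f hfv Ln (Ln + 1) 0 pn 0 (by omega) le_rfl (by omega)
        (by simp) (by omega) (fun i hi1 hi2 => hget i (by omega))]
      simp
    have hB : extract_bits_multi_byte_py_alt payload bo p L
        = (((pvVSum f nb / 2 ^ pn % 2 ^ Ln : Nat)) : Int) := by
      have hfl : PySem.Int.floordiv (p + L + 7) 8 = ((nb : Nat) : Int) := by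
        rw [PySem.Int.floordiv_eq_ediv_of_pos (by norm_num)]
        rw [show p + L + 7 = (((pn + Ln + 7 : Nat)) : Int) from by push_cast; omega]
        rw [show ((8:Int)) = (((8:Nat)) : Int) from rfl, ← Int.natCast_div]
      simp only [extract_bits_multi_byte_py_alt, hfl, Int.toNat_natCast,
        if_neg (show ¬ (L ≤ 0) from by omega), pvBLoop_inv payload bo f hfv hf nb hget,
        if_neg (show ¬ (p < 0) from by omega)]
      rw [show L.toNat = Ln from rfl, show p.toNat = pn from rfl]
      rw [show ((1 <<< Ln : Nat) : Int) = (2:Int) ^ Ln from by rw [Nat.shiftLeft_eq, one_mul]; push_cast; ring]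
      rw [pvBandPow, Int.shiftRight_eq_div_pow]
      push_cast
      rfl
    rw [hA, hB]
    rw [pvTail_eq f hf Ln 0 pn (by omega) (by omega)]
    simp [pvVSum, hnb]
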